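-- pv_equiv track=rewrite | github.com/TLN2021/PosTagger | Baseline - Simple/Utils.py | tokenizeSentence
-- ===== SOURCE A (Python) =====
-- def tokenizeSentence(sentence):
--     punctuations = '''!(){};:'"\,<>./?@#$%^&*_~·'''
--     tokenizedSentnce = ''
--
--     for index in range(0, len(sentence)):
--         if sentence[index] in punctuations:
--             if not (sentence[index] == '.' and sentence[index - 1] == '.'):
--                 tokenizedSentnce += ' ' + sentence[index]
--             else:
--                 tokenizedSentnce += sentence[index]
--         else:
--             tokenizedSentnce += sentence[index]
--
--     return tokenizedSentnce.split()
-- ===== SOURCE B (Python) =====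
-- def tokenizeSentence(sentence):
--     # One pass that builds the token list directly: flush the current word on
--     # whitespace, start a fresh token at punctuation (dots extend a dot-run),
--     # otherwise extend the current word. No intermediate string, no split().
--     punctuations = '''!(){};:'"\,<>./?@#$%^&*_~·'''
--     tokens = []
--     cur = ''
--     prev = None
--     for c in sentence:
--         if c.isspace():
--             if cur:
--                 tokens.append(cur)
--             cur = ''
--         elif c in punctuations and not (c == '.' and prev == '.'):
--             if cur:
--                 tokens.append(cur)
--             cur = c
--         else:
--             cur += c
--         prev = c
--     if cur:
--         tokens.append(cur)
--     return tokens
-- ===== Notes on version B (the rewrite author's own statement) =====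
-- stated objective: simpler
-- what changed: B tokenizes in a single pass that appends finished tokens directly (flushing the current word at whitespace or punctuation, extending it on a dot-run), instead of A's building an intermediate space-padded string and then calling split().
import Mathlib
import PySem

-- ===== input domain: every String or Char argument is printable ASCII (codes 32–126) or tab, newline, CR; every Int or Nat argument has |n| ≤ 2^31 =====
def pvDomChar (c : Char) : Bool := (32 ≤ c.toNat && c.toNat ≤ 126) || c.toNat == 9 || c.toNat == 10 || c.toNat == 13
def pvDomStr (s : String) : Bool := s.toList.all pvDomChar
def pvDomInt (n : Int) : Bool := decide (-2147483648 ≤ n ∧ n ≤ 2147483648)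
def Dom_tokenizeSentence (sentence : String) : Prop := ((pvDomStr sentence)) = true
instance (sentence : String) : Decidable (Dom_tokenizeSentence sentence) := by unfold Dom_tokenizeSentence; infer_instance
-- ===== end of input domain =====

-- B replaces A's build-a-spaced-string-then-split() with a single pass that emits
-- the token list directly (objective: simpler — one traversal, no intermediate string).

-- ===== PORT A =====
-- the punctuation constant both programs share (Python '''!(){};:'"\,<>./?@#$%^&*_~·''')
def pvPunct : List Char :=
  ['!', '(', ')', '{', '}', ';', ':', '\'', '"', '\\', ',', '<', '>', '.', '/', '?', '@', '#', '$', '%', '^', '&', '*', '_', '~', '·']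

def tokenizeSentence (sentence : String) : List String :=
  let s := sentence.toList
  let t := (PySem.List.pyRange 0 (s.length : Int) 1).foldl (fun acc i =>
      if pvPunct.contains (PySem.List.pyGetD s i ' ') then
        if ¬ (PySem.List.pyGetD s i ' ' = '.' ∧ PySem.List.pyGetD s (i - 1) ' ' = '.') then
          acc ++ (' ' :: [PySem.List.pyGetD s i ' '])
        else
          acc ++ [PySem.List.pyGetD s i ' ']
      else
        acc ++ [PySem.List.pyGetD s i ' ']) []
  (PySem.Chars.split₀ t).map String.ofList

-- ===== PORT B =====
-- one loop step of Source B: state = (tokens so far, current token, previous char)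
def pvStepB (st : List (List Char) × List Char × Option Char) (c : Char) :
    List (List Char) × List Char × Option Char :=
  if PySem.Chars.isspace c then
    (if st.2.1 = [] then st.1 else st.1 ++ [st.2.1], [], some c)
  else if pvPunct.contains c ∧ ¬ (c = '.' ∧ st.2.2 = some '.') then
    (if st.2.1 = [] then st.1 else st.1 ++ [st.2.1], [c], some c)
  else
    (st.1, st.2.1 ++ [c], some c)

def tokenizeSentence_alt (sentence : String) : List String :=
  let st := sentence.toList.foldl pvStepB ([], [], none)
  (if st.2.1 = [] then st.1 else st.1 ++ [st.2.1]).map String.ofList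

-- ===== PRECONDITION & SPEC =====
def Spec_tokenizeSentence (sentence : String) (out : List String) : Prop := out = tokenizeSentence_alt sentence
instance (sentence : String) (out : List String) : Decidable (Spec_tokenizeSentence sentence out) := by unfold Spec_tokenizeSentence; infer_instance

-- ===== CLAIM (what is proved, stated in full; the proofs are below) =====
def Claim_equal_tokenizeSentence : Prop := ∀ (sentence : String), Dom_tokenizeSentence sentence → Spec_tokenizeSentence sentence (tokenizeSentence sentence)

-- ===== LEMMAS AND PROOFS =====

-- what A's loop appends for character c whose predecessor (in A's wrap-around sense) is p
def pvEntryA (p c : Char) : List Char :=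
  if pvPunct.contains c then
    if ¬ (c = '.' ∧ p = '.') then [' ', c] else [c]
  else [c]

-- A's whole expanded string, recursively over (previous char, rest of the string)
def pvExpP : Char → List Char → List Char
  | _, [] => []
  | p, c :: cs => pvEntryA p c ++ pvExpP c cs

lemma pvPunct_all_not_space : pvPunct.all (fun c => !(PySem.Chars.isspace c)) = true := by rfl

lemma pvPunct_mem_not_space : ∀ c ∈ pvPunct, PySem.Chars.isspace c = false := by
  have h := pvPunct_all_not_space
  rw [List.all_eq_true] at h
  intro c hc
  simpa using h c hc

-- A's index loop from position k (1 ≤ k) computes pvExpP of the tail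
lemma pvFoldA (s : List Char) : ∀ (n k : Nat), s.length - k = n → 0 < k → k ≤ s.length →
    ∀ (acc : List Char),
    (PySem.List.pyRange (k : Int) (s.length : Int) 1).foldl (fun acc i =>
      if pvPunct.contains (PySem.List.pyGetD s i ' ') then
        if ¬ (PySem.List.pyGetD s i ' ' = '.' ∧ PySem.List.pyGetD s (i - 1) ' ' = '.') then
          acc ++ (' ' :: [PySem.List.pyGetD s i ' '])
        else
          acc ++ [PySem.List.pyGetD s i ' ']
      else
        acc ++ [PySem.List.pyGetD s i ' ']) acc
    = acc ++ pvExpP (s.getD (k - 1) ' ') (s.drop k) := by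
  intro n
  induction n with
  | zero =>
    intro k hn hk hle acc
    have hkl : k = s.length := by omega
    subst hkl
    have hr : PySem.List.pyRange (s.length : Int) (s.length : Int) 1 = [] := by
      simp [PySem.List.pyRange]
    rw [hr]
    simp [pvExpP, List.drop_length]
  | succ n ih =>
    intro k hn hk hle acc
    have hlt : k < s.length := by omega
    have hcast : ((k : Int)) < (s.length : Int) := by exact_mod_cast hlt
    rw [PySem.List.pyRange_one_cons hcast]
    simp only [List.foldl_cons]
    have h1 : PySem.List.pyGetD s (k : Int) ' ' = s.getD k ' ' := PySem.List.pyGetD_natCast s k ' '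
    have h2 : PySem.List.pyGetD s ((k : Int) - 1) ' ' = s.getD (k - 1) ' ' := by
      have : ((k : Int)) - 1 = ((k - 1 : Nat) : Int) := by omega
      rw [this, PySem.List.pyGetD_natCast]
    have h3 : ((k : Int)) + 1 = ((k + 1 : Nat) : Int) := by omega
    rw [h1, h2, h3, ih (k + 1) (by omega) (by omega) (by omega)]
    have hdrop : s.drop k = s.getD k ' ' :: s.drop (k + 1) := by
      rw [List.getD_eq_getElem s ' ' hlt]
      exact List.drop_eq_getElem_cons hlt
    rw [hdrop]
    have hk1 : k + 1 - 1 = k := by omega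
    rw [hk1]
    show _ = acc ++ (pvEntryA (s.getD (k - 1) ' ') (s.getD k ' ') ++ pvExpP (s.getD k ' ') (s.drop (k + 1)))
    simp only [pvEntryA]
    split_ifs <;> simp

-- the invariant tying split₀'s scan of A's expanded string to B's one-pass loop
lemma pvMain : ∀ (cs : List Char) (p : Char) (cur : List Char) (toks : List (List Char)),
    PySem.Chars.split₀.go (pvExpP p cs) cur.reverse toks.reverse
    = (let st := cs.foldl pvStepB (toks, cur, some p)
       if st.2.1 = [] then st.1 else st.1 ++ [st.2.1]) := by
  intro cs
  induction cs with
  | nil =>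
    intro p cur toks
    by_cases hcur : cur = [] <;>
      simp [pvExpP, PySem.Chars.split₀.go, hcur, List.isEmpty_iff]
  | cons c rest ih =>
    intro p cur toks
    simp only [pvExpP, List.foldl_cons]
    by_cases hsp : PySem.Chars.isspace c = true
    · have hc : c ∉ pvPunct := by
        intro hm
        rw [pvPunct_mem_not_space c hm] at hsp
        exact Bool.false_ne_true hsp
      have hentry : pvEntryA p c = [c] := by simp [pvEntryA, hc]
      have hstep : pvStepB (toks, cur, some p) c
          = (if cur = [] then toks else toks ++ [cur], [], some c) := by
        simp [pvStepB, hsp]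
      rw [hentry, hstep]
      by_cases hcur : cur = []
      · rw [if_pos hcur, ← ih c [] toks]
        subst hcur
        simp [PySem.Chars.split₀.go, hsp]
      · rw [if_neg hcur, ← ih c [] (toks ++ [cur])]
        simp [PySem.Chars.split₀.go, hsp, List.isEmpty_iff, hcur]
    · have hsp' : PySem.Chars.isspace c = false := by simpa using hsp
      have hspc : PySem.Chars.isspace ' ' = true := by decide
      by_cases hcond : pvPunct.contains c = true ∧ ¬ (c = '.' ∧ p = '.')
      · have hmem : c ∈ pvPunct := by simpa using hcond.1
        have hentry : pvEntryA p c = [' ', c] := by simp [pvEntryA, hmem, hcond.2]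
        have hstep : pvStepB (toks, cur, some p) c
            = (if cur = [] then toks else toks ++ [cur], [c], some c) := by
          simp [pvStepB, hsp', hmem, hcond.2]
        rw [hentry, hstep]
        by_cases hcur : cur = []
        · rw [if_pos hcur, ← ih c [c] toks]
          subst hcur
          simp [PySem.Chars.split₀.go, hsp', hspc]
        · rw [if_neg hcur, ← ih c [c] (toks ++ [cur])]
          simp [PySem.Chars.split₀.go, hsp', hspc, List.isEmpty_iff, hcur]
      · by_cases hA : pvPunct.contains c = true
        · have hB : c = '.' ∧ p = '.' := by tauto
          have hmem : c ∈ pvPunct := by simpa using hA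
          obtain ⟨hB1, hB2⟩ := hB
          subst hB1; subst hB2
          have hentry : pvEntryA '.' '.' = ['.'] := by simp [pvEntryA, hmem]
          have hstep : pvStepB (toks, cur, some '.') '.' = (toks, cur ++ ['.'], some '.') := by
            simp [pvStepB, hsp', hmem]
          rw [hentry, hstep, ← ih '.' (cur ++ ['.']) toks]
          simp [PySem.Chars.split₀.go, hsp']
        · have hc : c ∉ pvPunct := by simpa using hA
          have hentry : pvEntryA p c = [c] := by simp [pvEntryA, hc]
          have hstep : pvStepB (toks, cur, some p) c = (toks, cur ++ [c], some c) := by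
            simp [pvStepB, hsp', hc]
          rw [hentry, hstep, ← ih c (cur ++ [c]) toks]
          simp [PySem.Chars.split₀.go, hsp']

-- A's whole loop (index 0 handled with its wrap-around predecessor, then pvFoldA from k = 1)
lemma pvFoldA0 (c0 : Char) (rest : List Char) :
    (PySem.List.pyRange 0 (((c0 :: rest).length : Int)) 1).foldl (fun acc i =>
      if pvPunct.contains (PySem.List.pyGetD (c0 :: rest) i ' ') then
        if ¬ (PySem.List.pyGetD (c0 :: rest) i ' ' = '.' ∧ PySem.List.pyGetD (c0 :: rest) (i - 1) ' ' = '.') then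
          acc ++ (' ' :: [PySem.List.pyGetD (c0 :: rest) i ' '])
        else
          acc ++ [PySem.List.pyGetD (c0 :: rest) i ' ']
      else
        acc ++ [PySem.List.pyGetD (c0 :: rest) i ' ']) []
    = pvEntryA ((c0 :: rest).getLast (by simp)) c0 ++ pvExpP c0 rest := by
  have hpos : (0 : Int) < ((c0 :: rest).length : Int) := by
    simp
  rw [PySem.List.pyRange_one_cons hpos]
  simp only [List.foldl_cons]
  have h1 : ((0 : Int) + 1) = ((1 : Nat) : Int) := by norm_num
  rw [h1, pvFoldA (c0 :: rest) ((c0 :: rest).length - 1) 1 rfl one_pos (by simp)]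
  have hg0 : PySem.List.pyGetD (c0 :: rest) (0 : Int) ' ' = c0 :=
    PySem.List.pyGetD_zero_cons c0 rest ' '
  have hgm : PySem.List.pyGetD (c0 :: rest) ((0 : Int) - 1) ' ' = (c0 :: rest).getLast (by simp) := by
    norm_num
    exact PySem.List.pyGetD_neg_one _ ' ' (by simp)
  rw [hg0, hgm]
  simp only [pvEntryA, Nat.sub_self, List.getD_cons_zero, List.drop_succ_cons, List.drop_zero]
  split_ifs <;> simp

-- ===== VERDICT (by name: the statement is the Claim_ definition above) =====
theorem tokenizeSentence_spec : Claim_equal_tokenizeSentence := by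
  intro sentence _
  unfold Spec_tokenizeSentence
  cases h : sentence.toList with
  | nil =>
    simp [tokenizeSentence, tokenizeSentence_alt, h, PySem.List.pyRange,
      PySem.Chars.split₀, PySem.Chars.split₀.go]
  | cons c0 rest =>
    simp only [tokenizeSentence, tokenizeSentence_alt, h, List.foldl_cons]
    rw [pvFoldA0]
    by_cases hsp0 : PySem.Chars.isspace c0 = true
    · have hc : c0 ∉ pvPunct := by
        intro hm
        rw [pvPunct_mem_not_space c0 hm] at hsp0
        exact Bool.false_ne_true hsp0
      have hentry : pvEntryA ((c0 :: rest).getLast (by simp)) c0 = [c0] := by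
        simp [pvEntryA, hc]
      have hstep0 : pvStepB ([], [], none) c0 = ([], [], some c0) := by
        simp [pvStepB, hsp0]
      have key := pvMain rest c0 [] []
      simp only [List.reverse_nil] at key
      rw [hentry, hstep0, ← key]
      simp [PySem.Chars.split₀, PySem.Chars.split₀.go, hsp0]
    · have hsp0' : PySem.Chars.isspace c0 = false := by simpa using hsp0
      have hspc : PySem.Chars.isspace ' ' = true := by decide
      have hstep0 : pvStepB ([], [], none) c0 = ([], [c0], some c0) := by
        simp [pvStepB, hsp0']
      have key := pvMain rest c0 [c0] []
      simp only [List.reverse_nil, List.reverse_singleton] at key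
      rw [hstep0, ← key]
      simp only [pvEntryA]
      split_ifs <;> simp [PySem.Chars.split₀, PySem.Chars.split₀.go, hsp0', hspc]
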